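-- pv_equiv track=rewrite | github.com/tifanypan/fengshui-generator | backend/app/services/feng_shui_engine.py | _calculate_kua_number
-- ===== SOURCE A (Python) =====
-- from typing import Dict, List, Tuple, Any, Optional
--
-- def _calculate_kua_number(gender: str, birth_year: int, birth_month: int, birth_day: int) -> Optional[int]:
--     """
--     Calculate the kua number based on gender and birth date.
--
--     Args:
--         gender: 'male' or 'female'
--         birth_year: Year of birth
--         birth_month: Month of birth
--         birth_day: Day of birth
--
--     Returns:
--         Kua number (1-9)
--     """
--     # Handle missing data
--     if not all([gender, birth_year, birth_month, birth_day]):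
--         return None
--
--     # Use lunar year if date is before February 4
--     if birth_month == 1 or (birth_month == 2 and birth_day < 4):
--         lunar_year = birth_year - 1
--     else:
--         lunar_year = birth_year
--
--     # Calculate kua number based on gender
--     if gender.lower() == 'male':
--         # For males: 10 - (sum of year digits) % 9
--         year_sum = sum(int(digit) for digit in str(lunar_year))
--         while year_sum > 9:
--             year_sum = sum(int(digit) for digit in str(year_sum))
--         kua = 10 - year_sum
--         if kua == 10:  # Special case
--             kua = 1
--         elif kua == 5:  # Special case
--             kua = 2
--     else:  # female
--         # For females: (sum of year digits) + 5
--         year_sum = sum(int(digit) for digit in str(lunar_year))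
--         while year_sum > 9:
--             year_sum = sum(int(digit) for digit in str(year_sum))
--         kua = year_sum + 5
--         if kua > 9:  # If over 9, subtract 9
--             kua = kua - 9
--         elif kua == 5:  # Special case
--             kua = 8
--
--     return kua
-- ===== SOURCE B (Python) =====
-- from typing import Optional
--
--
-- def _calculate_kua_number(gender: str, birth_year: int, birth_month: int, birth_day: int) -> Optional[int]:
--     """Kua number via the closed-form digital root instead of repeated digit-sum loops."""
--     if not all([gender, birth_year, birth_month, birth_day]):
--         return None
--
--     lunar_year = birth_year - 1 if birth_month == 1 or (birth_month == 2 and birth_day < 4) else birth_year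
--
--     if lunar_year < 0:
--         raise ValueError("birth year must be non-negative")
--     # digital root: the value the repeated digit-sum loop converges to
--     dr = 0 if lunar_year == 0 else 1 + (lunar_year - 1) % 9
--
--     if gender.lower() == 'male':
--         kua = 10 - dr
--         if kua == 10:
--             kua = 1
--         elif kua == 5:
--             kua = 2
--     else:
--         kua = dr + 5
--         if kua > 9:
--             kua = kua - 9
--         elif kua == 5:
--             kua = 8
--     return kua
-- ===== Notes on version B (the rewrite author's own statement) =====
-- stated objective: idiomatic
-- what changed: Replaces A's string-based digit sums and the repeated digit-sum while loop with the closed-form digital root 1 + (lunar_year - 1) % 9 (0 for lunar year 0); both raise ValueError on negative years.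
import Mathlib
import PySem

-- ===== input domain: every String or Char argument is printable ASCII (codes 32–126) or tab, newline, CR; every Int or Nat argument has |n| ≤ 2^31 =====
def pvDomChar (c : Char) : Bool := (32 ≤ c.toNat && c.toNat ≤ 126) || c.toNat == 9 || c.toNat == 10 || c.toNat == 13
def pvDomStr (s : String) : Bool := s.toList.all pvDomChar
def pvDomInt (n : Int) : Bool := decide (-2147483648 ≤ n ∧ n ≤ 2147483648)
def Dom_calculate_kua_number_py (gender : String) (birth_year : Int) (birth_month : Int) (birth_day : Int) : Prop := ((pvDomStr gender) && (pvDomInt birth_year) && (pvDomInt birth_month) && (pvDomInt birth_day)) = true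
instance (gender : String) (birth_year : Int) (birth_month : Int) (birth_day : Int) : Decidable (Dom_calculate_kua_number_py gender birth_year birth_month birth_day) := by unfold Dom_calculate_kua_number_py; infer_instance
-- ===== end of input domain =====

-- B replaces A's repeated string-digit-sum while loop with the closed-form digital root
-- 1 + (lunar_year - 1) % 9 (0 for lunar year 0); idiomatic, same values on non-negative years,
-- and B raises ValueError on negative lunar years just as A does.
-- Pre_ excludes exactly the negative birth years on which A raises ValueError.


-- ===== PORT A =====
-- int(digit) for one char of str(n): exact on digit chars '0'-'9' (the only chars that occur
-- for the non-negative years admitted by Pre_)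
def pvDigitVal (c : Char) : Int := (c.toNat : Int) - 48

-- sum(int(digit) for digit in str(n))
def pvSumDigits (n : Int) : Int := ((PySem.Int.toChars n).map pvDigitVal).sum

-- 'while year_sum > 9: year_sum = sum(int(d) for d in str(year_sum))' — fuel-guarded loop;
-- fuel s.toNat suffices because the digit sum strictly decreases above 9
def pvWhileSum : Nat → Int → Int
  | 0, s => s
  | f + 1, s => if 9 < s then pvWhileSum f (pvSumDigits s) else s

def calculate_kua_number_py (gender : String) (birth_year : Int) (birth_month : Int) (birth_day : Int) : Option Int :=
  if gender = "" ∨ birth_year = 0 ∨ birth_month = 0 ∨ birth_day = 0 then none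
  else
    let lunar_year := if birth_month = 1 ∨ (birth_month = 2 ∧ birth_day < 4) then birth_year - 1 else birth_year
    if PySem.Str.lower gender = "male" then
      let ys0 := pvSumDigits lunar_year
      let year_sum := pvWhileSum ys0.toNat ys0
      let kua := 10 - year_sum
      some (if kua = 10 then 1 else if kua = 5 then 2 else kua)
    else
      let ys0 := pvSumDigits lunar_year
      let year_sum := pvWhileSum ys0.toNat ys0
      let kua := year_sum + 5
      some (if 9 < kua then kua - 9 else if kua = 5 then 8 else kua)

-- ===== PORT B =====
def calculate_kua_number_py_alt (gender : String) (birth_year : Int) (birth_month : Int) (birth_day : Int) : Option Int :=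
  if gender = "" ∨ birth_year = 0 ∨ birth_month = 0 ∨ birth_day = 0 then none
  else
    let lunar_year := if birth_month = 1 ∨ (birth_month = 2 ∧ birth_day < 4) then birth_year - 1 else birth_year
    if lunar_year < 0 then none  -- Python B raises ValueError here; excluded by Pre_
    else
      let dr := if lunar_year = 0 then 0 else 1 + PySem.Int.mod (lunar_year - 1) 9
      if PySem.Str.lower gender = "male" then
        let kua := 10 - dr
        some (if kua = 10 then 1 else if kua = 5 then 2 else kua)
      else
        let kua := dr + 5
        some (if 9 < kua then kua - 9 else if kua = 5 then 8 else kua)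

-- ===== PRECONDITION & SPEC =====
-- Pre_ excludes exactly the inputs on which both A and B raise ValueError: a negative birth
-- year that passes the truthiness guard (A: int('-') fails; B: explicit check).
def Pre_calculate_kua_number_py (gender : String) (birth_year : Int) (birth_month : Int) (birth_day : Int) : Prop :=
  0 ≤ birth_year ∨ gender = "" ∨ birth_month = 0 ∨ birth_day = 0
instance (gender : String) (birth_year : Int) (birth_month : Int) (birth_day : Int) : Decidable (Pre_calculate_kua_number_py gender birth_year birth_month birth_day) := by unfold Pre_calculate_kua_number_py; infer_instance

def pvWitness_calculate_kua_number_py : String × Int × Int × Int := ("male", 1990, 5, 10)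

def Spec_calculate_kua_number_py (gender : String) (birth_year : Int) (birth_month : Int) (birth_day : Int) (out : Option Int) : Prop := out = calculate_kua_number_py_alt gender birth_year birth_month birth_day
instance (gender : String) (birth_year : Int) (birth_month : Int) (birth_day : Int) (out : Option Int) : Decidable (Spec_calculate_kua_number_py gender birth_year birth_month birth_day out) := by unfold Spec_calculate_kua_number_py; infer_instance

-- ===== CLAIM (what is proved, stated in full; the proofs are below) =====
def Claim_equal_calculate_kua_number_py : Prop := ∀ (gender : String) (birth_year : Int) (birth_month : Int) (birth_day : Int), Dom_calculate_kua_number_py gender birth_year birth_month birth_day → Pre_calculate_kua_number_py gender birth_year birth_month birth_day → Spec_calculate_kua_number_py gender birth_year birth_month birth_day (calculate_kua_number_py gender birth_year birth_month birth_day)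

-- ===== LEMMAS AND PROOFS =====

-- digitVal of Nat.digitChar is the digit itself (digits below 10)
lemma pvDigitVal_digitChar (k : Nat) (h : k < 10) : pvDigitVal (Nat.digitChar k) = (k : Int) := by
  interval_cases k <;> decide

-- the mapped digit-sum of toDigitsCore is the Nat.digits sum plus the accumulator's sum
lemma pvCoreSum : ∀ (f n : Nat) (acc : List Char), n < 10 ^ f →
    ((Nat.toDigitsCore 10 f n acc).map pvDigitVal).sum
      = ((Nat.digits 10 n).sum : Int) + ((acc.map pvDigitVal).sum) := by
  intro f
  induction f with
  | zero =>
    intro n acc h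
    interval_cases n
    have hcore : Nat.toDigitsCore 10 0 0 acc = acc := rfl
    simp [hcore]
  | succ f ih =>
    intro n acc h
    rw [Nat.toDigitsCore]
    by_cases h0 : n / 10 = 0
    · have hn : n < 10 := by omega
      simp only [h0, if_pos]
      rcases Nat.eq_zero_or_pos n with hz | hp
      · subst hz
        simp [pvDigitVal_digitChar 0 (by omega)]
      · rw [Nat.digits_def' (by norm_num : 1 < 10) hp, h0]
        simp only [List.map_cons, List.sum_cons,
          pvDigitVal_digitChar (n % 10) (Nat.mod_lt _ (by norm_num))]
        simp
    · simp only [h0, if_false]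
      have hp : 0 < n := by omega
      have hlt : n / 10 < 10 ^ f := by
        rw [pow_succ] at h
        exact (Nat.div_lt_iff_lt_mul (by norm_num : 0 < 10)).mpr h
      rw [ih (n / 10) _ hlt, Nat.digits_def' (by norm_num : 1 < 10) hp]
      simp only [List.map_cons, List.sum_cons,
        pvDigitVal_digitChar (n % 10) (Nat.mod_lt _ (by norm_num))]
      push_cast
      ring

-- pvSumDigits of a non-negative Int is the Nat.digits sum
lemma pvSumDigits_eq (n : Int) (h : 0 ≤ n) :
    pvSumDigits n = ((Nat.digits 10 n.toNat).sum : Int) := by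
  unfold pvSumDigits PySem.Int.toChars
  rw [if_neg (by omega)]
  have hlt : n.toNat < 10 ^ (n.toNat + 1) :=
    lt_of_lt_of_le (Nat.lt_pow_self (by norm_num)) (Nat.pow_le_pow_right (by norm_num) (by omega))
  unfold Nat.toDigits
  rw [pvCoreSum (n.toNat + 1) n.toNat [] hlt]
  simp

-- the digit sum is at most the number itself
lemma pvDigits_sum_le (m : Nat) : (Nat.digits 10 m).sum ≤ m := by
  induction m using Nat.strong_induction_on with
  | _ m ih =>
    rcases Nat.eq_zero_or_pos m with hz | hp
    · simp [hz]
    · rw [Nat.digits_def' (by norm_num : 1 < 10) hp]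
      have h1 : m / 10 < m := Nat.div_lt_self hp (by norm_num)
      have := ih (m / 10) h1
      simp only [List.sum_cons]
      omega

-- above 9 the digit sum strictly decreases
lemma pvDigits_sum_lt (m : Nat) (h : 10 ≤ m) : (Nat.digits 10 m).sum < m := by
  rw [Nat.digits_def' (by norm_num : 1 < 10) (by omega)]
  have := pvDigits_sum_le (m / 10)
  simp only [List.sum_cons]
  omega

-- the digit sum of a positive number is positive
lemma pvDigits_sum_pos (m : Nat) (h : 0 < m) : 0 < (Nat.digits 10 m).sum := by
  induction m using Nat.strong_induction_on with
  | _ m ih =>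
    rw [Nat.digits_def' (by norm_num : 1 < 10) h]
    simp only [List.sum_cons]
    by_cases h0 : m % 10 = 0
    · have hp : 0 < m / 10 := by omega
      have := ih (m / 10) (Nat.div_lt_self h (by norm_num)) hp
      omega
    · omega

-- the digit sum keeps the value mod 9
lemma pvDigits_sum_mod (m : Nat) : (Nat.digits 10 m).sum % 9 = m % 9 :=
  (Nat.modEq_digits_sum 9 10 (by norm_num) m).symm

-- the while loop computes the digital root 1 + (s-1) % 9 for positive s (with enough fuel)
lemma pvWhileSum_eq : ∀ (f : Nat) (s : Int), 1 ≤ s → s ≤ (f : Int) →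
    pvWhileSum f s = 1 + (s - 1) % 9 := by
  intro f
  induction f with
  | zero => intro s h1 h2; omega
  | succ f ih =>
    intro s h1 h2
    rw [pvWhileSum]
    by_cases h9 : 9 < s
    · rw [if_pos h9]
      have hs : pvSumDigits s = ((Nat.digits 10 s.toNat).sum : Int) := pvSumDigits_eq s (by omega)
      have hlt : (Nat.digits 10 s.toNat).sum < s.toNat := pvDigits_sum_lt s.toNat (by omega)
      have hpos : 0 < (Nat.digits 10 s.toNat).sum := pvDigits_sum_pos s.toNat (by omega)
      have hmod : (Nat.digits 10 s.toNat).sum % 9 = s.toNat % 9 := pvDigits_sum_mod s.toNat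
      rw [ih (pvSumDigits s) (by omega) (by omega), hs]
      have h1' : ((Nat.digits 10 s.toNat).sum : Int) % 9 = (s.toNat : Int) % 9 := by
        omega
      have h2' : (s.toNat : Int) = s := by omega
      omega
    · rw [if_neg h9]
      omega

-- the loop applied to the digit sum of a non-negative year equals B's digital-root formula
lemma pvLoop_eq_droot (ly : Int) (h : 0 ≤ ly) :
    pvWhileSum (pvSumDigits ly).toNat (pvSumDigits ly)
      = if ly = 0 then 0 else 1 + PySem.Int.mod (ly - 1) 9 := by
  have hs : pvSumDigits ly = ((Nat.digits 10 ly.toNat).sum : Int) := pvSumDigits_eq ly h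
  by_cases hz : ly = 0
  · subst hz
    simp at hs
    rw [if_pos rfl, hs]
    simp [pvWhileSum]
  · rw [if_neg hz]
    have hp : 0 < ly.toNat := by omega
    have hpos : 0 < (Nat.digits 10 ly.toNat).sum := pvDigits_sum_pos ly.toNat hp
    have hle : (Nat.digits 10 ly.toNat).sum ≤ ly.toNat := pvDigits_sum_le ly.toNat
    have hmod : (Nat.digits 10 ly.toNat).sum % 9 = ly.toNat % 9 := pvDigits_sum_mod ly.toNat
    rw [pvWhileSum_eq (pvSumDigits ly).toNat (pvSumDigits ly) (by omega) (by omega)]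
    have : PySem.Int.mod (ly - 1) 9 = (ly - 1) % 9 := by
      unfold PySem.Int.mod; simp [Int.fmod_eq_emod]
    rw [this, hs]
    omega

-- ===== VERDICT (by name: the statement is the Claim_ definition above) =====
theorem calculate_kua_number_py_spec : Claim_equal_calculate_kua_number_py := by
  intro gender birth_year birth_month birth_day _ hpre
  unfold Spec_calculate_kua_number_py calculate_kua_number_py calculate_kua_number_py_alt
  by_cases hg : gender = "" ∨ birth_year = 0 ∨ birth_month = 0 ∨ birth_day = 0
  · rw [if_pos hg, if_pos hg]
  · rw [if_neg hg, if_neg hg]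
    have hy : 0 ≤ birth_year := by
      rcases hpre with h | h | h | h
      · exact h
      all_goals exact absurd (by tauto) hg
    set ly := if birth_month = 1 ∨ (birth_month = 2 ∧ birth_day < 4) then birth_year - 1 else birth_year with hly
    have hly0 : 0 ≤ ly := by
      have hyne : birth_year ≠ 0 := by tauto
      by_cases hc : birth_month = 1 ∨ (birth_month = 2 ∧ birth_day < 4) <;>
        simp [hly, hc] <;> omega
    rw [if_neg (by omega : ¬ ly < 0)]
    have hkey := pvLoop_eq_droot ly hly0
    simp only [hkey]
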